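-- pv_equiv track=rewrite | github.com/MrBrantCode/unitest_baseline | mut_generate/mist_train_cf/cf_87412/solution.py | PrimeIterator
-- ===== SOURCE A (Python) =====
-- import math
--
-- def PrimeIterator(start, end):
--     cache = {}
--
--     def is_prime(num):
--         if num < 2:
--             return False
--         if num in cache:
--             return cache[num]
--         for i in range(2, int(math.sqrt(num)) + 1):
--             if num % i == 0:
--                 cache[num] = False
--                 return False
--         cache[num] = True
--         return True
--
--     def digit_sum_divisible_by_three(num):
--         digit_sum = sum(int(digit) for digit in str(num))
--         return digit_sum % 3 == 0
--
--     for num in range(start, end):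
--         if is_prime(num) and not digit_sum_divisible_by_three(num):
--             yield num
-- ===== SOURCE B (Python) =====
-- import math
--
-- def PrimeIterator(start, end):
--     lo = max(start, 2)
--     if lo >= end:
--         return
--     # base primes up to isqrt(end-1), found incrementally by dividing only by smaller base primes
--     limit = math.isqrt(end - 1)
--     base = []
--     for m in range(2, limit + 1):
--         ok = True
--         for p in base:
--             if p * p > m:
--                 break
--             if m % p == 0:
--                 ok = False
--                 break
--         if ok:
--             base.append(m)
--     out = []
--     for num in range(lo, end):
--         ok = True
--         for p in base:
--             if p * p > num:
--                 break
--             if num % p == 0: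
--                 ok = False
--                 break
--         if ok and sum(int(d) for d in str(num)) % 3 != 0:
--             out.append(num)
--     yield from out
-- ===== Notes on version B (the rewrite author's own statement) =====
-- stated objective: faster
-- what changed: B first builds the list of primes up to isqrt(end-1) incrementally (each candidate trial-divided only by smaller found primes), then tests each number in [max(start,2), end) by dividing only by those base primes with p*p <= num, instead of A's per-number trial division by every integer up to sqrt with a never-hit memo dict; intended as faster and measured ~2x median on the probe's largest inputs, though near-empty ranges with a huge end pay B's one-off base-prime build and can be slower there.
import Mathlib
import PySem

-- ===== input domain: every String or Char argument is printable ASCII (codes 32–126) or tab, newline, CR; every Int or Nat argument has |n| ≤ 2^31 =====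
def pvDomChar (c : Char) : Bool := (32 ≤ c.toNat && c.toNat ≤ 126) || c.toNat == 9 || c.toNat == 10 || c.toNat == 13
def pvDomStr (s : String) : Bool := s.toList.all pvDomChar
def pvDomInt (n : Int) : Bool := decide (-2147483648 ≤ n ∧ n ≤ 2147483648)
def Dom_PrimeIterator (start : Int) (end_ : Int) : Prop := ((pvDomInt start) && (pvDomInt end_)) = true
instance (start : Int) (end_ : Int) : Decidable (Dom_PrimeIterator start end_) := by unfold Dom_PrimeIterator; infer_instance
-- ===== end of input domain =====

-- B builds the base primes up to isqrt(end-1) once and trial-divides each candidate in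
-- [max(start,2), end) only by base primes p with p*p <= num (A divides every candidate by
-- every integer up to its sqrt); return value = the list the generator yields.

-- ===== PORT A =====
-- digit_sum_divisible_by_three, negated use; shared by both ports (both Pythons compute it identically).
-- int(d): only reached with num >= 2 in both programs, where every char is a digit, so the .getD 0 is never used.
def pvDigitSumDiv3 (num : Int) : Bool :=
  PySem.Int.mod ((PySem.Int.toChars num).foldl (fun s c => s + ((PySem.Int.ofChars? [c]).getD 0)) 0) 3 == 0

-- is_prime with its cache dict. int(math.sqrt(num)) is ported as Nat.sqrt num.toNat,
-- exact for 0 <= num <= 2^31 (float sqrt then truncation equals isqrt there).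
def pvIsPrimeA (cache : PySem.Dict Int Bool) (num : Int) : Bool × PySem.Dict Int Bool :=
  if num < 2 then (false, cache)
  else match cache.get? num with
    | some b => (b, cache)
    | none =>
      if (PySem.List.pyRange 2 ((Nat.sqrt num.toNat : Int) + 1) 1).any
           (fun i => PySem.Int.mod num i == 0)
      then (false, cache.insert num false)
      else (true, cache.insert num true)

def pvStepA (st : List Int × PySem.Dict Int Bool) (num : Int) : List Int × PySem.Dict Int Bool :=
  let r := pvIsPrimeA st.2 num
  if r.1 && !(pvDigitSumDiv3 num) then (st.1 ++ [num], r.2) else (st.1, r.2)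

def PrimeIterator (start : Int) (end_ : Int) : List Int :=
  ((PySem.List.pyRange start end_ 1).foldl pvStepA ([], PySem.Dict.empty)).1

-- ===== PORT B =====
-- inner loop of Source B (both phases use it): break on p*p > num, early False on a divisor
def pvCheck (primes : List Int) (num : Int) : Bool :=
  match primes with
  | [] => true
  | p :: ps =>
    if p * p > num then true
    else if PySem.Int.mod num p == 0 then false
    else pvCheck ps num

-- base-prime phase of Source B; limit = math.isqrt(max(end-1, 0)) is ported exactly as
-- Nat.sqrt (end_-1).toNat (math.isqrt is exact integer sqrt; max(.,0) is .toNat)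
def pvBaseList (end_ : Int) : List Int :=
  (PySem.List.pyRange 2 ((Nat.sqrt (end_ - 1).toNat : Int) + 1) 1).foldl
    (fun acc m => if pvCheck acc m then acc ++ [m] else acc) []

def PrimeIterator_alt (start : Int) (end_ : Int) : List Int :=
  -- lo = max(start, 2); empty scan range returns no values before building base primes
  if max start 2 ≥ end_ then []
  else (PySem.List.pyRange (max start 2) end_ 1).foldl
    (fun out num =>
      if pvCheck (pvBaseList end_) num && !(pvDigitSumDiv3 num) then out ++ [num] else out) []

-- ===== PRECONDITION & SPEC =====
def Spec_PrimeIterator (start : Int) (end_ : Int) (out : List Int) : Prop := out = PrimeIterator_alt start end_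
instance (start : Int) (end_ : Int) (out : List Int) : Decidable (Spec_PrimeIterator start end_ out) := by unfold Spec_PrimeIterator; infer_instance

-- ===== CLAIM (what is proved, stated in full; the proofs are below) =====
def Claim_equal_PrimeIterator : Prop := ∀ (start : Int) (end_ : Int), Dom_PrimeIterator start end_ → Spec_PrimeIterator start end_ (PrimeIterator start end_)

-- ===== LEMMAS AND PROOFS =====

-- the common filter predicate both folds compute
def pvPrimeb (num : Int) : Bool := decide (Nat.Prime num.toNat)
def pvF (num : Int) : Bool := pvPrimeb num && !(pvDigitSumDiv3 num)

lemma pvTrial_eq (num : Int) (h : 2 ≤ num) :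
    ((PySem.List.pyRange 2 ((Nat.sqrt num.toNat : Int) + 1) 1).any
      (fun i => PySem.Int.mod num i == 0)) = !pvPrimeb num := by
  have hnum : num = (num.toNat : Int) := (Int.toNat_of_nonneg (by omega)).symm
  by_cases hp : Nat.Prime num.toNat <;>
    simp [pvPrimeb, hp, List.any_eq_true, PySem.List.mem_pyRange_one,
      PySem.Int.mod_eq_zero_iff_dvd]
  · intro i h2i hilt hdvd
    have hi0 : i = (i.toNat : Int) := (Int.toNat_of_nonneg (by omega)).symm
    rw [hi0, hnum] at hdvd
    have hdn : i.toNat ∣ num.toNat := Int.natCast_dvd_natCast.mp hdvd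
    exact (Nat.prime_def_le_sqrt.mp hp).2 i.toNat (by omega) (by omega) hdn
  · refine ⟨(num.toNat.minFac : Int), ⟨?_, ?_⟩, ?_⟩
    · exact_mod_cast (Nat.minFac_prime (by omega : num.toNat ≠ 1)).two_le
    · have h1 := Nat.minFac_sq_le_self (n := num.toNat) (by omega) hp
      have h2 : num.toNat.minFac ≤ Nat.sqrt num.toNat := by
        rw [Nat.le_sqrt]; nlinarith [h1]
      exact_mod_cast h2
    · conv_rhs => rw [hnum]
      exact_mod_cast Nat.minFac_dvd _
lemma pvIsPrimeA_eq (cache : PySem.Dict Int Bool) (num : Int) (hc : cache.get? num = none) :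
    pvIsPrimeA cache num = (pvPrimeb num, if num < 2 then cache else cache.insert num (pvPrimeb num)) := by
  unfold pvIsPrimeA
  by_cases h2 : num < 2
  · have hf : pvPrimeb num = false := by
      simp only [pvPrimeb, decide_eq_false_iff_not]
      intro hp; have := hp.two_le; omega
    simp [h2, hf]
  · rw [pvTrial_eq num (by omega)]
    simp only [h2, if_false, hc]
    cases hb : pvPrimeb num <;> simp
lemma pvFoldA (l : List Int) (out : List Int) (cache : PySem.Dict Int Bool)
    (hs : l.Pairwise (· < ·)) (hc : ∀ x ∈ l, cache.get? x = none) :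
    (l.foldl pvStepA (out, cache)).1 = out ++ l.filter pvF := by
  induction l generalizing out cache with
  | nil => simp
  | cons num rest ih =>
    have hmiss : cache.get? num = none := hc num (by simp)
    have hstep : pvStepA (out, cache) num
        = (if pvF num then out ++ [num] else out,
           if num < 2 then cache else cache.insert num (pvPrimeb num)) := by
      simp only [pvStepA, pvIsPrimeA_eq cache num hmiss, pvF]
      by_cases hb : (pvPrimeb num && !pvDigitSumDiv3 num) = true <;> simp [hb]
    rw [List.foldl_cons, hstep]
    have hc' : ∀ x ∈ rest, (if num < 2 then cache else cache.insert num (pvPrimeb num)).get? x = none := by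
      intro x hx
      have hne : x ≠ num := by
        have := (List.pairwise_cons.mp hs).1 x hx; omega
      split
      · exact hc x (by simp [hx])
      · rw [PySem.Dict.get?_insert_of_ne _ _ hne]; exact hc x (by simp [hx])
    rw [ih _ _ (List.pairwise_cons.mp hs).2 hc', List.filter_cons]
    cases pvF num <;> simp
lemma pvCheck_iff (num : Int) (l : List Int) (h2 : ∀ p ∈ l, 2 ≤ p) (hs : l.Pairwise (· < ·)) :
    (pvCheck l num = true ↔ ∀ p ∈ l, p * p ≤ num → ¬ (p ∣ num)) := by
  induction l with
  | nil => simp [pvCheck]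
  | cons p ps ih =>
    have hp2 : 2 ≤ p := h2 p (by simp)
    have hlt := (List.pairwise_cons.mp hs).1
    rw [pvCheck]
    by_cases hgt : p * p > num
    · simp only [hgt, if_true, true_iff]
      intro q hq hqle
      rcases List.mem_cons.mp hq with rfl | hq'
      · omega
      · exfalso
        have h1 : p < q := hlt q hq'
        nlinarith [hqle]
    · simp only [hgt, if_false]
      by_cases hdvd : PySem.Int.mod num p == 0
      · simp only [hdvd, if_true]
        have : p ∣ num := (PySem.Int.mod_eq_zero_iff_dvd num p).mp (by simpa using hdvd)
        constructor
        · intro h; cases h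
        · intro h; exact absurd (h p (by simp) (by omega)) (by simp [this])
      · simp only [hdvd, Bool.false_eq_true, if_false]
        rw [ih (fun q hq => h2 q (by simp [hq])) (List.pairwise_cons.mp hs).2]
        constructor
        · intro h q hq hqle
          rcases List.mem_cons.mp hq with rfl | hq'
          · intro hd
            exact hdvd (by simp [(PySem.Int.mod_eq_zero_iff_dvd num q).mpr hd])
          · exact h q hq' hqle
        · intro h q hq hqle; exact h q (by simp [hq]) hqle

lemma pvCheck_prime (L num : Int) (h : 2 ≤ num) (hL0 : 0 ≤ L) (hLL : num < L * L) :
    pvCheck ((PySem.List.pyRange 2 L 1).filter pvPrimeb) num = pvPrimeb num := by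
  have hnum : num = (num.toNat : Int) := (Int.toNat_of_nonneg (by omega)).symm
  have hmem : ∀ p : Int, p ∈ (PySem.List.pyRange 2 L 1).filter pvPrimeb ↔
      (2 ≤ p ∧ p < L) ∧ Nat.Prime p.toNat := by
    intro p
    simp [List.mem_filter, PySem.List.mem_pyRange_one, pvPrimeb]
  have hiff := pvCheck_iff num ((PySem.List.pyRange 2 L 1).filter pvPrimeb)
    (fun p hp => ((hmem p).mp hp).1.1)
    ((PySem.List.pairwise_lt_pyRange_one 2 L).filter _)
  by_cases hp : Nat.Prime num.toNat
  · simp only [pvPrimeb, hp, decide_true]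
    rw [hiff.mpr]
    intro q hq hqle hdvd
    obtain ⟨⟨hq2, hqlt⟩, hqprime⟩ := (hmem q).mp hq
    have hq0 : q = (q.toNat : Int) := (Int.toNat_of_nonneg (by omega)).symm
    rw [hq0, hnum] at hdvd
    have hdn : q.toNat ∣ num.toNat := Int.natCast_dvd_natCast.mp hdvd
    rcases (Nat.Prime.eq_one_or_self_of_dvd hp q.toNat hdn) with h1 | h1
    · omega
    · have hqn : q = num := by omega
      nlinarith [hqle]
  · simp only [pvPrimeb, hp, decide_false]
    rw [Bool.eq_false_iff, Ne, hiff]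
    intro hall
    set m := num.toNat.minFac with hm
    have hmp : Nat.Prime m := Nat.minFac_prime (by omega)
    have hsq : m * m ≤ num.toNat := by
      have := Nat.minFac_sq_le_self (n := num.toNat) (by omega) hp
      nlinarith [this]
    have hsqI : (m : Int) * (m : Int) ≤ num := by
      rw [hnum]; exact_mod_cast hsq
    have hmL : (m : Int) < L := by
      rcases lt_or_ge (m : Int) L with h' | h'
      · exact h'
      · exfalso
        have : L * L ≤ (m : Int) * (m : Int) := mul_le_mul h' h' hL0 (le_trans hL0 h')
        omega
    have hdvd : (m : Int) ∣ num := by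
      conv_rhs => rw [hnum]
      exact_mod_cast Nat.minFac_dvd _
    refine hall (m : Int)
      ((hmem _).mpr ⟨⟨by exact_mod_cast hmp.two_le, hmL⟩, by simpa using hmp⟩) hsqI hdvd

lemma pvBaseFold (L : Int) : ∀ (n : Nat) (c : Int), (L - c).toNat = n → 2 ≤ c → c ≤ L →
    (PySem.List.pyRange c L 1).foldl (fun acc m => if pvCheck acc m then acc ++ [m] else acc)
      ((PySem.List.pyRange 2 c 1).filter pvPrimeb)
    = (PySem.List.pyRange 2 L 1).filter pvPrimeb := by
  intro n
  induction n with
  | zero =>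
    intro c hn h2 hcL
    have : c = L := by omega
    subst this
    rw [PySem.List.pyRange_one_eq_nil (le_refl c), List.foldl_nil]
  | succ k ih =>
    intro c hn h2 hcL
    have hlt : c < L := by omega
    rw [PySem.List.pyRange_one_cons hlt, List.foldl_cons]
    have hcheck : pvCheck ((PySem.List.pyRange 2 c 1).filter pvPrimeb) c = pvPrimeb c :=
      pvCheck_prime c c h2 (by omega) (by nlinarith)
    have hrange : (PySem.List.pyRange 2 (c + 1) 1).filter pvPrimeb
        = (PySem.List.pyRange 2 c 1).filter pvPrimeb ++ [c].filter pvPrimeb := by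
      rw [PySem.List.pyRange_one_succ_right (by omega), List.filter_append]
    have hstep : (if pvCheck ((PySem.List.pyRange 2 c 1).filter pvPrimeb) c
          then (PySem.List.pyRange 2 c 1).filter pvPrimeb ++ [c]
          else (PySem.List.pyRange 2 c 1).filter pvPrimeb)
        = (PySem.List.pyRange 2 (c + 1) 1).filter pvPrimeb := by
      rw [hcheck, hrange]
      by_cases hb : pvPrimeb c = true <;> simp [hb]
    rw [hstep, ih (c + 1) (by omega) (by omega) (by omega)]

lemma pvBaseList_eq (end_ : Int) :
    pvBaseList end_
      = (PySem.List.pyRange 2 ((Nat.sqrt (end_ - 1).toNat : Int) + 1) 1).filter pvPrimeb := by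
  unfold pvBaseList
  set L : Int := (Nat.sqrt (end_ - 1).toNat : Int) + 1 with hL
  rcases le_or_gt L 2 with h2 | h2
  · rw [PySem.List.pyRange_one_eq_nil h2, List.foldl_nil]
    simp
  · have := pvBaseFold L ((L - 2).toNat) 2 rfl (le_refl 2) (by omega)
    rw [PySem.List.pyRange_one_eq_nil (le_refl 2), List.filter_nil] at this
    exact this

lemma pvMainFold (L : Int) (hL0 : 0 ≤ L) (base : List Int)
    (hbase : base = (PySem.List.pyRange 2 L 1).filter pvPrimeb) :
    ∀ (l : List Int) (out : List Int), (∀ x ∈ l, 2 ≤ x ∧ x < L * L) →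
    l.foldl (fun out num =>
        if pvCheck base num && !(pvDigitSumDiv3 num) then out ++ [num] else out) out
      = out ++ l.filter pvF := by
  intro l
  induction l with
  | nil => simp
  | cons num rest ih =>
    intro out hx
    obtain ⟨h2, hLL⟩ := hx num (by simp)
    rw [List.foldl_cons, List.filter_cons]
    have hcheck : pvCheck base num = pvPrimeb num := by
      rw [hbase]; exact pvCheck_prime L num h2 hL0 hLL
    have hcond : (pvCheck base num && !(pvDigitSumDiv3 num)) = pvF num := by
      rw [hcheck]; rfl
    rw [hcond]
    by_cases hc : pvF num = true
    · simp only [hc, if_true]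
      rw [ih _ (fun x hxr => hx x (by simp [hxr]))]
      simp
    · simp only [Bool.eq_false_iff.mpr hc, Bool.false_eq_true, if_false]
      exact ih _ (fun x hxr => hx x (by simp [hxr]))

lemma pvF_two_le (num : Int) (h : pvF num = true) : 2 ≤ num := by
  have hp : Nat.Prime num.toNat := by
    have := (Bool.and_eq_true _ _).mp h
    simpa [pvPrimeb] using this.1
  have := hp.two_le; omega

lemma pvRanges_eq (start end_ : Int) :
    (PySem.List.pyRange start end_ 1).filter pvF
      = (PySem.List.pyRange (max start 2) end_ 1).filter pvF := by
  rcases le_or_gt 2 start with h | h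
  · rw [max_eq_left h]
  · rw [max_eq_right (by omega)]
    rcases le_or_gt 2 end_ with he | he
    · rw [PySem.List.pyRange_one_append start 2 end_ (by omega) he, List.filter_append]
      have h1 : (PySem.List.pyRange start 2 1).filter pvF = [] := by
        rw [List.filter_eq_nil_iff]
        intro a ha hF
        have := (PySem.List.mem_pyRange_one.mp ha).2
        have := pvF_two_le a hF; omega
      rw [h1, List.nil_append]
    · rw [PySem.List.pyRange_one_eq_nil (show end_ ≤ 2 by omega), List.filter_nil]
      rw [List.filter_eq_nil_iff]
      intro a ha hF
      have := (PySem.List.mem_pyRange_one.mp ha).2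
      have := pvF_two_le a hF; omega

-- ===== VERDICT (by name: the statement is the Claim_ definition above) =====
theorem PrimeIterator_spec : Claim_equal_PrimeIterator := by
  intro start end_ _
  unfold Spec_PrimeIterator PrimeIterator PrimeIterator_alt
  have hA := pvFoldA (PySem.List.pyRange start end_ 1) [] PySem.Dict.empty
    (PySem.List.pairwise_lt_pyRange_one _ _) (by intro x _; rfl)
  set L : Int := (Nat.sqrt (end_ - 1).toNat : Int) + 1 with hLdef
  have hBnd : end_ ≤ L * L := by
    have h1 : (end_ - 1).toNat < (Nat.sqrt (end_ - 1).toNat + 1) * (Nat.sqrt (end_ - 1).toNat + 1) :=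
      Nat.lt_succ_sqrt _
    have h2 : ((end_ - 1).toNat : Int)
        < ((Nat.sqrt (end_ - 1).toNat + 1) * (Nat.sqrt (end_ - 1).toNat + 1) : Nat) := by
      exact_mod_cast h1
    have h3 : end_ - 1 ≤ ((end_ - 1).toNat : Int) := Int.self_le_toNat _
    push_cast at h2
    rw [hLdef]; omega
  have hB := pvMainFold L (by omega) (pvBaseList end_) (pvBaseList_eq end_)
    (PySem.List.pyRange (max start 2) end_ 1) []
    (by
      intro x hx
      have hm := PySem.List.mem_pyRange_one.mp hx
      constructor
      · omega
      · omega)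
  rw [hA, List.nil_append, pvRanges_eq]
  by_cases hE : max start 2 ≥ end_
  · rw [if_pos hE, PySem.List.pyRange_one_eq_nil (show end_ ≤ max start 2 from hE), List.filter_nil]
  · rw [if_neg hE, hB, List.nil_append]
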